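-- pv_equiv track=rewrite | github.com/YourkChhunlay/PHY | Midterm/Midterm/3-Midterm/3.31.(2).py | calculate_insurance_wage
-- ===== SOURCE A (Python) =====
-- def calculate_insurance_wage(monthly_wage):
--     assumed_wages = {
--         200000: 200000,
--         250000: 225000,
--         300000: 275000,
--         350000: 325000,
--         400000: 375000,
--         450000: 425000,
--         500000: 475000,
--         550000: 525000,
--         600000: 575000,
--         650000: 625000,
--         700000: 675000,
--         750000: 725000,
--         800000: 775000,
--         850000: 825000,
--         900000: 875000,
--         950000: 925000,
--         1000000: 1000000
--     }
--
--     for assumed, actual in assumed_wages.items():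
--         if monthly_wage <= assumed:
--             return actual
-- ===== SOURCE B (Python) =====
-- _THRESHOLDS = [200000, 250000, 300000, 350000, 400000, 450000, 500000,
--                550000, 600000, 650000, 700000, 750000, 800000, 850000,
--                900000, 950000, 1000000]
-- _VALUES = [200000, 225000, 275000, 325000, 375000, 425000, 475000,
--            525000, 575000, 625000, 675000, 725000, 775000, 825000,
--            875000, 925000, 1000000]
--
--
-- def calculate_insurance_wage(monthly_wage):
--     # binary search for the first threshold >= monthly_wage
--     lo, hi = 0, len(_THRESHOLDS)
--     while lo < hi:
--         mid = (lo + hi) // 2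
--         if _THRESHOLDS[mid] < monthly_wage:
--             lo = mid + 1
--         else:
--             hi = mid
--     if lo == len(_THRESHOLDS):
--         return None
--     return _VALUES[lo]
-- ===== Notes on version B (the rewrite author's own statement) =====
-- stated objective: alternative
-- what changed: Replaced the linear first-match scan over the dict's items with a binary search (bisect_left) over a precomputed sorted threshold array paired with a value array.
import Mathlib
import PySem

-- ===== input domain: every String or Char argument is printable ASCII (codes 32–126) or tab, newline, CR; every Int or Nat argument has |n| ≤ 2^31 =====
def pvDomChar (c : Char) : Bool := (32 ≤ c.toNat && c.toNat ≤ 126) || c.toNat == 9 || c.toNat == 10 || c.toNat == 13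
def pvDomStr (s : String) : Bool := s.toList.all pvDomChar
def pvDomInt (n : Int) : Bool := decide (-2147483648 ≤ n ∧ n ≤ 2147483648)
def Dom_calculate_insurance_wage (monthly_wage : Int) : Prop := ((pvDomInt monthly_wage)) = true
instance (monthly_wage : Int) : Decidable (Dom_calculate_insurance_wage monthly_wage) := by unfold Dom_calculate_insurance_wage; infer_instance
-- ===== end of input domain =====

-- B replaces A's linear first-match scan over the bracket dict with a binary search over a sorted threshold array (alternative structure, same result).

-- ===== PORT A =====
-- the dict literal; .items() iterates it in insertion order
def pvAssumedWages : List (Int × Int) :=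
  [(200000, 200000), (250000, 225000), (300000, 275000), (350000, 325000),
   (400000, 375000), (450000, 425000), (500000, 475000), (550000, 525000),
   (600000, 575000), (650000, 625000), (700000, 675000), (750000, 725000),
   (800000, 775000), (850000, 825000), (900000, 875000), (950000, 925000),
   (1000000, 1000000)]

-- the for-loop with early return; falling off the loop returns None
def pvScanA : List (Int × Int) → Int → Option Int
  | [], _ => none
  | (assumed, actual) :: rest, w => if w ≤ assumed then some actual else pvScanA rest w

def calculate_insurance_wage (monthly_wage : Int) : Option Int :=
  pvScanA pvAssumedWages monthly_wage

-- ===== PORT B =====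
def pvThresholds : List Int :=
  [200000, 250000, 300000, 350000, 400000, 450000, 500000, 550000, 600000,
   650000, 700000, 750000, 800000, 850000, 900000, 950000, 1000000]

def pvValues : List Int :=
  [200000, 225000, 275000, 325000, 375000, 425000, 475000, 525000, 575000,
   625000, 675000, 725000, 775000, 825000, 875000, 925000, 1000000]

-- the while-loop of Source B; fuel = hi - lo bounds the iteration count (hi - lo shrinks each step).
-- _THRESHOLDS[mid] with lo ≤ mid < hi ≤ len is always in range, so getD 0 is exact there.
def pvBisectLoop : Nat → Nat → Nat → Int → Nat
  | 0, lo, _, _ => lo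
  | fuel + 1, lo, hi, w =>
    if lo < hi then
      let mid := (lo + hi) / 2
      if pvThresholds.getD mid 0 < w then pvBisectLoop fuel (mid + 1) hi w
      else pvBisectLoop fuel lo mid w
    else lo

def calculate_insurance_wage_alt (monthly_wage : Int) : Option Int :=
  let n := pvThresholds.length
  let lo := pvBisectLoop n 0 n monthly_wage
  if lo = n then none else some (pvValues.getD lo 0)

-- ===== PRECONDITION & SPEC =====
def Spec_calculate_insurance_wage (monthly_wage : Int) (out : Option Int) : Prop := out = calculate_insurance_wage_alt monthly_wage
instance (monthly_wage : Int) (out : Option Int) : Decidable (Spec_calculate_insurance_wage monthly_wage out) := by unfold Spec_calculate_insurance_wage; infer_instance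

-- ===== CLAIM (what is proved, stated in full; the proofs are below) =====
def Claim_equal_calculate_insurance_wage : Prop := ∀ (monthly_wage : Int), Dom_calculate_insurance_wage monthly_wage → Spec_calculate_insurance_wage monthly_wage (calculate_insurance_wage monthly_wage)

-- ===== LEMMAS AND PROOFS =====

-- the threshold array is sorted (checked by computation)
lemma pvThresholds_sorted : ∀ j, j < 17 → ∀ i, i ≤ j →
    pvThresholds.getD i 0 ≤ pvThresholds.getD j 0 := by decide

-- binary-search invariant: indices below the returned point are < w, indices from it on are ≥ w
lemma pvBisectLoop_inv (fuel : Nat) : ∀ (lo hi : Nat) (w : Int),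
    lo ≤ hi → hi ≤ 17 → hi - lo ≤ fuel →
    (∀ i, i < lo → pvThresholds.getD i 0 < w) →
    (∀ i, hi ≤ i → i < 17 → w ≤ pvThresholds.getD i 0) →
    pvBisectLoop fuel lo hi w ≤ 17 ∧
    (∀ i, i < pvBisectLoop fuel lo hi w → pvThresholds.getD i 0 < w) ∧
    (∀ i, pvBisectLoop fuel lo hi w ≤ i → i < 17 → w ≤ pvThresholds.getD i 0) := by
  induction fuel with
  | zero =>
    intro lo hi w hlh h17 hf hb ha
    simp only [pvBisectLoop]
    have hlo : lo = hi := by omega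
    subst hlo
    exact ⟨by omega, hb, ha⟩
  | succ fuel ih =>
    intro lo hi w hlh h17 hf hb ha
    simp only [pvBisectLoop]
    by_cases h : lo < hi
    · rw [if_pos h]
      have hmidlt : (lo + hi) / 2 < hi := by omega
      have hmidge : lo ≤ (lo + hi) / 2 := by omega
      by_cases hc : pvThresholds.getD ((lo + hi) / 2) 0 < w
      · rw [if_pos hc]
        refine ih ((lo + hi) / 2 + 1) hi w (by omega) h17 (by omega) ?_ ha
        intro i hi'
        by_cases hil : i < lo
        · exact hb i hil
        · have : pvThresholds.getD i 0 ≤ pvThresholds.getD ((lo + hi) / 2) 0 :=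
            pvThresholds_sorted _ (by omega) i (by omega)
          omega
      · rw [if_neg hc]
        refine ih lo ((lo + hi) / 2) w (by omega) (by omega) (by omega) hb ?_
        intro i hmi hi17
        by_cases hih : hi ≤ i
        · exact ha i hih hi17
        · have : pvThresholds.getD ((lo + hi) / 2) 0 ≤ pvThresholds.getD i 0 :=
            pvThresholds_sorted i hi17 _ hmi
          omega
    · rw [if_neg h]
      have hlo : lo = hi := by omega
      subst hlo
      exact ⟨by omega, hb, ha⟩

-- A's scan over ts.zip vs, characterized by the split point r
lemma pvScanA_zip (ts vs : List Int) (w : Int) : ∀ (r : Nat),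
    ts.length = vs.length → r ≤ ts.length →
    (∀ i, i < r → ts.getD i 0 < w) →
    (∀ i, r ≤ i → i < ts.length → w ≤ ts.getD i 0) →
    pvScanA (ts.zip vs) w = if r = ts.length then none else some (vs.getD r 0) := by
  induction ts generalizing vs with
  | nil =>
    intro r _ hr _ _
    have : r = 0 := by simpa using hr
    subst this
    simp [pvScanA]
  | cons t ts' ih =>
    intro r hlen hr hb ha
    cases vs with
    | nil => simp at hlen
    | cons v vs' =>
      simp only [List.zip_cons_cons, pvScanA]
      cases r with
      | zero =>
        have hw : w ≤ t := by
          have := ha 0 (by omega) (by simp)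
          simpa using this
        rw [if_pos hw]
        simp
      | succ r' =>
        have ht : t < w := by simpa using hb 0 (by omega)
        rw [if_neg (by omega)]
        have := ih vs' r' (by simpa using hlen) (by simpa using hr)
          (fun i hi => by simpa using hb (i + 1) (by omega))
          (fun i h1 h2 => by simpa using ha (i + 1) (by omega) (by simpa using h2))
        rw [this]
        simp

-- ===== VERDICT (by name: the statement is the Claim_ definition above) =====
theorem calculate_insurance_wage_spec : Claim_equal_calculate_insurance_wage := by
  intro w _
  show pvScanA pvAssumedWages w = calculate_insurance_wage_alt w
  obtain ⟨h17, hb, ha⟩ := pvBisectLoop_inv 17 0 17 w (by omega) (by omega) (by omega)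
    (fun i hi => absurd hi (by omega)) (fun i h1 h2 => absurd h2 (by omega))
  have hz : pvAssumedWages = pvThresholds.zip pvValues := by rfl
  have hL : pvThresholds.length = 17 := by rfl
  show pvScanA pvAssumedWages w =
    if pvBisectLoop 17 0 17 w = 17 then none else some (pvValues.getD (pvBisectLoop 17 0 17 w) 0)
  rw [hz, pvScanA_zip pvThresholds pvValues w (pvBisectLoop 17 0 17 w) (by rfl)
    (by rw [hL]; exact h17) (by simpa [hL] using hb) (by simpa [hL] using ha), hL]
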